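-- pv_equiv track=rewrite | github.com/Y-o-Z/master_thesis | GECToR/datasets for MTurk/prepare_data_for_survey.py | remove_spaces
-- ===== SOURCE A (Python) =====
-- def remove_spaces(sentence):  # n't, 's, punctuation
--     index = 0
--     while index < len(sentence):
--         if sentence[index] == "'" and index > 1:
--             if sentence[index - 2:index + 3] == " n't ":
--                 sentence = sentence[:index - 2] + sentence[index - 1:]
--             elif sentence[index - 1:index + 3] == " 's ":
--                 sentence = sentence[:index - 1] + sentence[index:]
--             else:
--                 index += 1
--         elif sentence[index] in [".", ",", "!"] and index > 0 and sentence[index - 1] == " ":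
--             sentence = sentence[:index - 1] + sentence[index:]
--         else:
--             index += 1
--     return sentence
-- ===== SOURCE B (Python) =====
-- def remove_spaces(sentence):  # n't, 's, punctuation
--     # Single forward pass: emit chars to a buffer, fixing the buffer tail
--     # (popping the offending space) when a pattern is seen, instead of
--     # rebuilding the string by slicing on every hit.
--     out = []
--     n = len(sentence)
--     for i, c in enumerate(sentence):
--         if c == "'" and len(out) >= 2:
--             if out[-1] == "n" and out[-2] == " " and sentence[i + 1:i + 3] == "t ":
--                 del out[-2]
--             elif out[-1] == " " and sentence[i + 1:i + 3] == "s ":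
--                 del out[-1]
--             out.append(c)
--         elif c in ".,!" and out and out[-1] == " ":
--             out[-1] = c
--         else:
--             out.append(c)
--     return "".join(out)
-- ===== Notes on version B (the rewrite author's own statement) =====
-- stated objective: faster
-- what changed: Replaced A's while loop that rebuilds the whole string by slicing+concatenation on every pattern hit with a single forward pass that emits characters to a buffer and pops the offending space off the buffer tail, joining once at the end.
import Mathlib
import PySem

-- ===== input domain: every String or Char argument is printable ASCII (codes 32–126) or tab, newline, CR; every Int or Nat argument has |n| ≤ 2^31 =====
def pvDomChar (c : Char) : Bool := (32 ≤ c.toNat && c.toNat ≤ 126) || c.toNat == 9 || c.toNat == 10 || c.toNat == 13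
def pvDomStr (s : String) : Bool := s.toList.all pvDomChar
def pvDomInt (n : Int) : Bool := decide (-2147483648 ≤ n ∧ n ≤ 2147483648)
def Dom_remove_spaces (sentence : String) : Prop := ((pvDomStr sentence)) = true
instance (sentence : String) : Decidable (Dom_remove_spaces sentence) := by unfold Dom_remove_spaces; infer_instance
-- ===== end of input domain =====

-- B rewrites A's repeated-reslicing while loop as one forward pass emitting to a
-- buffer and fixing the buffer tail; the objective is asymptotic speed (O(n) vs O(n^2)).

-- ===== PORT A =====
-- A's while loop: state (sentence, index); every slice bound used is nonnegative
-- under the branch guards (index > 1 resp. index > 0), so xs[:k] = take k,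
-- xs[k:] = drop k and xs[a:b] = (drop a).take (b-a) are exact here.
-- The loop is made structural with a fuel counter (a totality device only:
-- each iteration strictly decreases s.length - i, which starts at s.length,
-- so the fuel s.length + 1 supplied below is never exhausted).
def removeSpacesLoopA : Nat → List Char → Nat → List Char
  | 0, s, _ => s
  | fuel + 1, s, i =>
    if h : i < s.length then
      if s[i] = '\'' ∧ 1 < i then
        if (s.drop (i - 2)).take 5 = " n't ".toList then
          removeSpacesLoopA fuel (s.take (i - 2) ++ s.drop (i - 1)) i
        else if (s.drop (i - 1)).take 4 = " 's ".toList then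
          removeSpacesLoopA fuel (s.take (i - 1) ++ s.drop i) i
        else
          removeSpacesLoopA fuel s (i + 1)
      else if (s[i] = '.' ∨ s[i] = ',' ∨ s[i] = '!') ∧ 0 < i ∧ s[i - 1]? = some ' ' then
        removeSpacesLoopA fuel (s.take (i - 1) ++ s.drop i) i
      else
        removeSpacesLoopA fuel s (i + 1)
    else s

def remove_spaces (sentence : String) : String :=
  String.ofList (removeSpacesLoopA (sentence.toList.length + 1) sentence.toList 0)

-- ===== PORT B =====
-- B's single pass: `acc` is the output buffer REVERSED (head = out[-1]);
-- the lookahead sentence[i+1:i+3] == "t " / "s " is the shape of `rest`.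
def removeSpacesStepB (c : Char) (rest acc : List Char) : List Char :=
  if c = '\'' ∧ 2 ≤ acc.length then
    if acc[0]? = some 'n' ∧ acc[1]? = some ' ' ∧ rest.take 2 = ['t', ' '] then
      c :: acc.eraseIdx 1                                    -- del out[-2]; append c
    else if acc[0]? = some ' ' ∧ rest.take 2 = ['s', ' '] then
      c :: acc.tail                                          -- del out[-1]; append c
    else c :: acc
  else if (c = '.' ∨ c = ',' ∨ c = '!') ∧ acc[0]? = some ' ' then
    c :: acc.tail                                            -- out[-1] = c
  else c :: acc

def removeSpacesLoopB (rest acc : List Char) : List Char :=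
  match rest with
  | [] => acc.reverse
  | c :: rs => removeSpacesLoopB rs (removeSpacesStepB c rs acc)

def remove_spaces_alt (sentence : String) : String :=
  String.ofList (removeSpacesLoopB sentence.toList [])

-- ===== PRECONDITION & SPEC =====
def Spec_remove_spaces (sentence : String) (out : String) : Prop := out = remove_spaces_alt sentence
instance (sentence : String) (out : String) : Decidable (Spec_remove_spaces sentence out) := by unfold Spec_remove_spaces; infer_instance

-- ===== CLAIM (what is proved, stated in full; the proofs are below) =====
def Claim_equal_remove_spaces : Prop := ∀ (sentence : String), Dom_remove_spaces sentence → Spec_remove_spaces sentence (remove_spaces sentence)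

-- ===== LEMMAS AND PROOFS =====

lemma drop_revlen_add {α : Type} (t l : List α) (k : Nat) :
    List.drop (t.length + k) (t.reverse ++ l) = List.drop k l := by
  simp [List.drop_append]

lemma take_revlen_add {α : Type} (t l : List α) (k : Nat) :
    List.take (t.length + k) (t.reverse ++ l) = t.reverse ++ List.take k l := by
  simp [List.take_append]

-- One step of A's loop at index |acc| on the string acc.reverse ++ c :: rs
-- transforms the state exactly as B's buffer step does.
lemma loopA_step (c : Char) (rs acc : List Char) :
    removeSpacesLoopA (rs.length + 1 + 1) (acc.reverse ++ c :: rs) acc.length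
      = removeSpacesLoopA (rs.length + 1) ((removeSpacesStepB c rs acc).reverse ++ rs) (removeSpacesStepB c rs acc).length := by
  rcases acc with _ | ⟨a1, _ | ⟨a2, t⟩⟩
  · rw [removeSpacesLoopA]
    simp only [removeSpacesStepB]
    split_ifs <;> simp_all
  · rw [removeSpacesLoopA]
    simp only [removeSpacesStepB]
    split_ifs <;> simp_all
  · rw [removeSpacesLoopA]
    simp only [removeSpacesStepB]
    split_ifs <;> simp_all [Nat.add_assoc, drop_revlen_add, take_revlen_add]

lemma loopA_eq_loopB (rest : List Char) : ∀ acc,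
    removeSpacesLoopA (rest.length + 1) (acc.reverse ++ rest) acc.length = removeSpacesLoopB rest acc := by
  induction rest with
  | nil =>
    intro acc
    rw [removeSpacesLoopA]
    simp [removeSpacesLoopB]
  | cons c rs ih =>
    intro acc
    rw [List.length_cons, loopA_step, ih, removeSpacesLoopB]

-- ===== VERDICT (by name: the statement is the Claim_ definition above) =====
theorem remove_spaces_spec : Claim_equal_remove_spaces := by
  intro s _
  unfold Spec_remove_spaces remove_spaces remove_spaces_alt
  exact congrArg String.ofList (by simpa using loopA_eq_loopB s.toList [])
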